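-- pv_equiv track=rewrite | github.com/KelvinIsDaBest/AI | nlp-movie-review.py | extract_compound_terms
-- ===== SOURCE A (Python) =====
-- def extract_compound_terms(tokens, compounds):
--     result = []
--     i = 0
--     while i < len(tokens):
--         found = False
--         for compound in compounds:
--             compound_words = compound.split('_')
--             if i + len(compound_words) <= len(tokens):
--                 match = True
--                 for j in range(len(compound_words)):
--                     if tokens[i+j] != compound_words[j]:
--                         match = False
--                         break
--                 if match:
--                     result.append('_'.join(compound_words))
--                     i += len(compound_words)
--                     found = True
--                     break
--         if not found:
--             result.append(tokens[i])
--             i += 1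
--     return result
-- ===== SOURCE B (Python) =====
-- def extract_compound_terms(tokens, compounds):
--     # Index compounds by their first word; at each position only the few
--     # candidates whose first word equals the current token are tried, in
--     # original compounds order (first match wins, as in a linear scan).
--     index = {}
--     for compound in compounds:
--         words = compound.split('_')
--         index.setdefault(words[0], []).append(words)
--     result = []
--     n = len(tokens)
--     i = 0
--     while i < n:
--         for words in index.get(tokens[i], ()):
--             if i + len(words) <= n and all(tokens[i + j] == words[j] for j in range(len(words))):
--                 result.append('_'.join(words))
--                 i += len(words)
--                 break
--         else:
--             result.append(tokens[i])
--             i += 1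
--     return result
-- ===== Notes on version B (the rewrite author's own statement) =====
-- stated objective: faster
-- what changed: B pre-builds a dict mapping each compound's first word to its candidate word lists (in original order), so each position only tries candidates whose first word equals the current token instead of rescanning every compound.
import Mathlib
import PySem

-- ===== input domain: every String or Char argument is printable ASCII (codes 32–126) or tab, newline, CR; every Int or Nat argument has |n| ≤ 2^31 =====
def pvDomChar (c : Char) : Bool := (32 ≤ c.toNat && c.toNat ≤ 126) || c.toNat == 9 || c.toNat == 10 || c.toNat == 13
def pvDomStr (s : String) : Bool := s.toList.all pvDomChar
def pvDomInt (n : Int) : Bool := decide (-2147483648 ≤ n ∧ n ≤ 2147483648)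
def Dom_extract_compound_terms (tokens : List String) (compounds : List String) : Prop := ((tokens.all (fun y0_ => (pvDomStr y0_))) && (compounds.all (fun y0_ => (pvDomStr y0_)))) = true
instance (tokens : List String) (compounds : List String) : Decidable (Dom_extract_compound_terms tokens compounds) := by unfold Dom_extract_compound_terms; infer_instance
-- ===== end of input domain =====

-- B replaces A's scan of ALL compounds at every position by a dict keyed on the
-- first word of each compound, so only candidates starting with the current
-- token are tried (objective: faster, asymptotic; same return value everywhere).

-- ===== PORT A =====
-- compound.split('_')  (sep '_' is never empty, so split? is always some)
def ectsSplit (c : String) : List String := (PySem.Str.split? c "_").getD []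

-- A's inner j-loop: 'match' flag, break on first mismatch
def ectsMatchA (tokens ws : List String) (i j : Nat) : Bool :=
  if j < ws.length then
    if tokens.getD (i + j) "" = ws.getD j "" then ectsMatchA tokens ws i (j + 1) else false
  else true
termination_by ws.length - j

-- A's 'for compound in compounds: … break' — first compound that fits and matches
def ectsFindA (tokens : List String) (i : Nat) : List String → Option (List String)
  | [] => none
  | c :: cs =>
    let ws := ectsSplit c
    if i + ws.length ≤ tokens.length then
      if ectsMatchA tokens ws i 0 then some ws else ectsFindA tokens i cs
    else ectsFindA tokens i cs

-- A's while loop; fuel = tokens.length + 1 is a totality device only: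
-- the loop stops as soon as i ≥ tokens.length, and i grows at every step
def ectsLoopA (tokens compounds : List String) : Nat → Nat → List String → List String
  | 0, _, acc => acc
  | fuel + 1, i, acc =>
    if i < tokens.length then
      match ectsFindA tokens i compounds with
      | some ws => ectsLoopA tokens compounds fuel (i + ws.length) (acc ++ [PySem.Str.join "_" ws])
      | none => ectsLoopA tokens compounds fuel (i + 1) (acc ++ [tokens.getD i ""])
    else acc

def extract_compound_terms (tokens : List String) (compounds : List String) : List String :=
  ectsLoopA tokens compounds (tokens.length + 1) 0 []

-- ===== PORT B =====
-- index.setdefault(words[0], []).append(words), per compound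
def ectsIndex (compounds : List String) : PySem.Dict String (List (List String)) :=
  compounds.foldl
    (fun d c =>
      let ws := ectsSplit c
      d.modify (ws.getD 0 "") [] (· ++ [ws]))
    PySem.Dict.empty

-- B's 'for words in index.get(tokens[i], ()): … break' with the all(…) check
def ectsFindB (tokens : List String) (i : Nat) : List (List String) → Option (List String)
  | [] => none
  | ws :: rest =>
    if i + ws.length ≤ tokens.length &&
        (List.range ws.length).all (fun j => tokens.getD (i + j) "" == ws.getD j "") then
      some ws
    else ectsFindB tokens i rest

-- B's while loop (same fuel device)
def ectsLoopB (tokens : List String) (index : PySem.Dict String (List (List String))) :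
    Nat → Nat → List String → List String
  | 0, _, acc => acc
  | fuel + 1, i, acc =>
    if i < tokens.length then
      match ectsFindB tokens i (index.getD (tokens.getD i "") []) with
      | some ws => ectsLoopB tokens index fuel (i + ws.length) (acc ++ [PySem.Str.join "_" ws])
      | none => ectsLoopB tokens index fuel (i + 1) (acc ++ [tokens.getD i ""])
    else acc

def extract_compound_terms_alt (tokens : List String) (compounds : List String) : List String :=
  ectsLoopB tokens (ectsIndex compounds) (tokens.length + 1) 0 []

-- ===== PRECONDITION & SPEC =====
def Spec_extract_compound_terms (tokens : List String) (compounds : List String) (out : List String) : Prop := out = extract_compound_terms_alt tokens compounds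
instance (tokens : List String) (compounds : List String) (out : List String) : Decidable (Spec_extract_compound_terms tokens compounds out) := by unfold Spec_extract_compound_terms; infer_instance

-- ===== CLAIM (what is proved, stated in full; the proofs are below) =====
def Claim_equal_extract_compound_terms : Prop := ∀ (tokens : List String) (compounds : List String), Dom_extract_compound_terms tokens compounds → Spec_extract_compound_terms tokens compounds (extract_compound_terms tokens compounds)

-- ===== LEMMAS AND PROOFS =====

-- splitOn's worker never returns []
theorem ects_go_ne_nil (sep : List Char) :
    ∀ (fuel : Nat) (l cur : List Char) (acc : List (List Char)),
      PySem.Chars.splitOn.go sep fuel l cur acc ≠ [] := by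
  intro fuel
  induction fuel with
  | zero => intro l cur acc; simp [PySem.Chars.splitOn.go]
  | succ n ih =>
    intro l cur acc
    cases l with
    | nil => simp [PySem.Chars.splitOn.go]
    | cons c rest =>
      rw [PySem.Chars.splitOn.go]
      split
      · exact ih _ _ _
      · exact ih _ _ _

theorem ectsSplit_ne_nil (c : String) : ectsSplit c ≠ [] := by
  unfold ectsSplit
  simp only [PySem.Str.split?, PySem.Chars.split?, PySem.Chars.splitOn]
  intro h
  simp at h
  exact ects_go_ne_nil _ _ _ _ _ h

theorem ects_beq (a b : String) : (a == b) = decide (a = b) := rfl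

-- A's j-loop equals the all(range(...)) check of B
theorem ectsMatchA_eq_range' (tokens ws : List String) (i : Nat) :
    ∀ (k j : Nat), ws.length - j = k →
      ectsMatchA tokens ws i j
        = (List.range' j k).all (fun m => tokens.getD (i + m) "" == ws.getD m "") := by
  intro k
  induction k with
  | zero =>
    intro j hj
    rw [ectsMatchA]
    simp [Nat.not_lt.mpr (Nat.le_of_sub_eq_zero hj)]
  | succ n ih =>
    intro j hj
    have hjlt : j < ws.length := by omega
    rw [ectsMatchA, List.range'_succ, List.all_cons, if_pos hjlt, ects_beq]
    by_cases h : tokens.getD (i + j) "" = ws.getD j ""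
    · rw [if_pos h, decide_eq_true h, Bool.true_and, ih (j + 1) (by omega)]
    · rw [if_neg h, decide_eq_false h, Bool.false_and]

theorem ectsMatchA_eq_all (tokens ws : List String) (i : Nat) :
    ectsMatchA tokens ws i 0
      = (List.range ws.length).all (fun m => tokens.getD (i + m) "" == ws.getD m "") := by
  rw [List.range_eq_range']
  exact ectsMatchA_eq_range' tokens ws i ws.length 0 (by omega)

-- the index's bucket of key k is exactly the split compounds whose first word is k
theorem ectsIndex_getD (compounds : List String) (k : String) :
    (ectsIndex compounds).getD k []
      = (compounds.map ectsSplit).filter (fun ws => ws.getD 0 "" == k) := by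
  have gen : ∀ (cs : List String) (d : PySem.Dict String (List (List String))),
      (cs.foldl (fun d c =>
          let ws := ectsSplit c
          d.modify (ws.getD 0 "") [] (· ++ [ws])) d).getD k []
        = d.getD k [] ++ (cs.map ectsSplit).filter (fun ws => ws.getD 0 "" == k) := by
    intro cs
    induction cs with
    | nil => intro d; simp
    | cons c rest ih =>
      intro d
      simp only [List.foldl_cons, List.map_cons, List.filter_cons, ih]
      rw [PySem.Dict.getD_modify]
      by_cases hk : k = (ectsSplit c).getD 0 ""
      · subst hk
        simp
      · have hb : ((ectsSplit c).getD 0 "" == k) = false := by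
          rw [ects_beq]; exact decide_eq_false (fun h => hk h.symm)
        simp only [List.getD_eq_getElem?_getD] at hk hb
        simp [hk, hb]
  unfold ectsIndex
  have h := gen compounds PySem.Dict.empty
  simp only [List.getD_eq_getElem?_getD] at h ⊢
  simp [h]

-- first matching candidate in the bucket = first matching compound in the full list
theorem ectsFind_eq (tokens : List String) (i : Nat) :
    ∀ (cs : List String),
      ectsFindB tokens i
          ((cs.map ectsSplit).filter (fun ws => ws.getD 0 "" == tokens.getD i ""))
        = ectsFindA tokens i cs := by
  intro cs
  induction cs with
  | nil => simp [ectsFindB, ectsFindA]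
  | cons c rest ih =>
    simp only [List.map_cons, List.filter_cons]
    by_cases hk : (ectsSplit c).getD 0 "" = tokens.getD i ""
    · -- the candidate is in the bucket; both sides test the same condition
      rw [if_pos (by simpa using hk)]
      rw [ectsFindA, ectsFindB]
      by_cases hfit : i + (ectsSplit c).length ≤ tokens.length
      · simp only [hfit, if_true, ectsMatchA_eq_all, decide_true, Bool.true_and]
        split
        · rfl
        · exact ih
      · simp only [hfit, if_false, decide_false, Bool.false_and, Bool.false_eq_true,
          if_false]
        exact ih
    · -- not in the bucket; A's match fails at j = 0 because the first words differ
      rw [if_neg (by simpa using hk)]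
      rw [ectsFindA]
      have hne : ectsSplit c ≠ [] := ectsSplit_ne_nil c
      have hlen : 0 < (ectsSplit c).length := List.length_pos_iff.mpr hne
      have hmatch : ectsMatchA tokens (ectsSplit c) i 0 = false := by
        rw [ectsMatchA]
        have h0 : ¬ tokens.getD (i + 0) "" = (ectsSplit c).getD 0 "" := by
          simpa [eq_comm] using hk
        rw [if_pos hlen, if_neg h0]
      simp only [hmatch, Bool.false_eq_true, if_false, ite_self]
      exact ih

-- the two while loops run in lockstep
theorem ectsLoop_eq (tokens compounds : List String) :
    ∀ (fuel i : Nat) (acc : List String),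
      ectsLoopA tokens compounds fuel i acc
        = ectsLoopB tokens (ectsIndex compounds) fuel i acc := by
  intro fuel
  induction fuel with
  | zero => intro i acc; rfl
  | succ n ih =>
    intro i acc
    rw [ectsLoopA, ectsLoopB]
    by_cases hi : i < tokens.length
    · simp only [hi, if_true]
      rw [ectsIndex_getD, ectsFind_eq]
      cases ectsFindA tokens i compounds with
      | none => exact ih _ _
      | some ws => exact ih _ _
    · simp [hi]

-- ===== VERDICT (by name: the statement is the Claim_ definition above) =====
theorem extract_compound_terms_spec : Claim_equal_extract_compound_terms := by
  intro tokens compounds _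
  unfold Spec_extract_compound_terms extract_compound_terms extract_compound_terms_alt
  exact ectsLoop_eq tokens compounds (tokens.length + 1) 0 []
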